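-- pv_equiv track=rewrite | github.com/Khacviet0301/Programming-ASS | Q1.py | count_palindromes_behind
-- ===== SOURCE A (Python) =====
-- ALPHA = ['a', 'b', 'c', 'd']
--
-- def count_palindromes_behind(s):
--     n = len(s)
--
--     def gen_palindromes(length):
--         half_len = (length + 1) // 2
--         total = 4 ** half_len
--         for num in range(total):
--             digits = []
--             tmp = num
--             for _ in range(half_len):
--                 digits.append(ALPHA[tmp % 4])
--                 tmp //= 4
--             digits.reverse()
--             first_half = digits
--             if length % 2 == 0:
--                 pal = first_half + first_half[::-1]
--             else:
--                 pal = first_half + first_half[-2::-1]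
--             yield ''.join(pal)
--
--     count = 0
--     for pal in gen_palindromes(n):
--         if pal < s:
--             count += 1
--         elif pal >= s:
--             break
--     return count
-- ===== SOURCE B (Python) =====
-- ALPHA = ['a', 'b', 'c', 'd']
--
-- def count_palindromes_behind(s):
--     # Direct rank counting over the palindrome's first half: O(n) instead of
--     # enumerating up to 4**ceil(n/2) palindromes.
--     n = len(s)
--     h = (n + 1) // 2
--     half = s[:h]
--
--     def rank(p):
--         # number of len(p)-letter strings over ALPHA lexicographically smaller than p
--         if not p:
--             return 0
--         c = p[0]
--         below = sum(1 for a in ALPHA if a < c)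
--         r = below * 4 ** (len(p) - 1)
--         if c in ALPHA:
--             r += rank(p[1:])
--         return r
--
--     count = rank(half)
--     if all(c in ALPHA for c in half):
--         pal = half + (half[::-1] if n % 2 == 0 else half[:-1][::-1])
--         if pal < s:
--             count += 1
--     return count
-- ===== Notes on version B (the rewrite author's own statement) =====
-- stated objective: faster
-- what changed: Replaces the generate-and-compare enumeration of all 4^ceil(n/2) palindromes with a direct O(n) rank computation over the palindrome's first half (digit counting per position plus one final comparison of the boundary palindrome).
import Mathlib
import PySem

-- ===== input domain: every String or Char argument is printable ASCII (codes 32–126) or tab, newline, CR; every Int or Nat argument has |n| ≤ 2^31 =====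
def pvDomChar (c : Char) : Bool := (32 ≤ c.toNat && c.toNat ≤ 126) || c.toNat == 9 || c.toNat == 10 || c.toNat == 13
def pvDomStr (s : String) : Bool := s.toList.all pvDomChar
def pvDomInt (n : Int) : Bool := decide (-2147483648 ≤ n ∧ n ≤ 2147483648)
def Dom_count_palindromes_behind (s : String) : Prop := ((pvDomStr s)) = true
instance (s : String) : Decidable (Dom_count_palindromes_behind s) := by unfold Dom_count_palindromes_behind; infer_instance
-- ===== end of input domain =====

-- B replaces A's generate-and-compare enumeration of all 4^ceil(n/2) palindromes by a direct
-- rank computation over the palindrome's first half (objective: faster).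
-- Python's `<` on str is Lean's `<` on `String.toList` (PYSEM: str COMPARISON), so both ports
-- compare `List Char` values.

-- ===== PORT A =====
-- ALPHA = ['a', 'b', 'c', 'd']
def cpbALPHA : List Char := ['a', 'b', 'c', 'd']

-- inner loop of gen_palindromes: for _ in range(half_len): digits.append(ALPHA[tmp % 4]); tmp //= 4
-- (ALPHA[tmp % 4] via pyGetD: 0 ≤ tmp % 4 < 4 = len(ALPHA), so Python never raises here)
def cpbDigitsLoop : Nat → List Char × Int → List Char × Int
  | 0, st => st
  | k+1, (digits, tmp) =>
      cpbDigitsLoop k (digits ++ [PySem.List.pyGetD cpbALPHA (PySem.Int.mod tmp 4) 'a'],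
                       PySem.Int.floordiv tmp 4)

-- body of gen_palindromes for one num: digits.reverse(); pal = first_half + first_half[::-1]
-- (even length) or first_half + first_half[-2::-1] (odd length); slices via PySem.List.slice?
-- (step -1 ≠ 0, so Python never raises; .getD [] only discharges the Option)
def cpbPal (halfLen : Nat) (evenLen : Bool) (num : Int) : List Char :=
  let firstHalf := (cpbDigitsLoop halfLen ([], num)).1.reverse
  if evenLen then
    firstHalf ++ (PySem.List.slice? firstHalf none none (-1)).getD []
  else
    firstHalf ++ (PySem.List.slice? firstHalf (some (-2)) none (-1)).getD []

-- for pal in gen_palindromes(n): if pal < s: count += 1 elif pal >= s: break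
def cpbLoop (s : List Char) (halfLen : Nat) (evenLen : Bool) : List Int → Int → Int
  | [], count => count
  | num :: rest, count =>
      let pal := cpbPal halfLen evenLen num
      if pal < s then cpbLoop s halfLen evenLen rest (count + 1)
      else if s ≤ pal then count
      else cpbLoop s halfLen evenLen rest count

def count_palindromes_behind (s : String) : Int :=
  let n : Int := PySem.Str.len s
  let halfLen : Nat := (PySem.Int.floordiv (n + 1) 2).toNat  -- (n+1)//2 ≥ 0 iterations
  let total : Int := 4 ^ halfLen
  cpbLoop s.toList halfLen (PySem.Int.mod n 2 == 0) (PySem.List.pyRange 0 total 1) 0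

-- ===== PORT B =====
-- below = sum(1 for a in ALPHA if a < c)
def cpbBelow (c : Char) : Int := (cpbALPHA.countP (fun a => a < c) : Int)

-- rank(p): number of len(p)-letter strings over ALPHA lexicographically smaller than p
def cpbRank : List Char → Int
  | [] => 0
  | c :: p =>
      let r := cpbBelow c * 4 ^ p.length   -- below * 4 ** (len(p) - 1)
      if c ∈ cpbALPHA then r + cpbRank p else r

def count_palindromes_behind_alt (s : String) : Int :=
  let l := s.toList
  let n := l.length
  let h := (n + 1) / 2                      -- (n + 1) // 2 on a nonnegative int
  let half := l.take h                      -- s[:h]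
  let count := cpbRank half
  if half.all (fun c => c ∈ cpbALPHA) then
    -- half[::-1] is reverse, half[:-1][::-1] is dropLast then reverse
    let pal := half ++ (if n % 2 = 0 then half.reverse else half.dropLast.reverse)
    if pal < l then count + 1 else count
  else count

-- ===== PRECONDITION & SPEC =====
def Spec_count_palindromes_behind (s : String) (out : Int) : Prop := out = count_palindromes_behind_alt s
instance (s : String) (out : Int) : Decidable (Spec_count_palindromes_behind s out) := by unfold Spec_count_palindromes_behind; infer_instance

-- ===== CLAIM (what is proved, stated in full; the proofs are below) =====
def Claim_equal_count_palindromes_behind : Prop := ∀ (s : String), Dom_count_palindromes_behind s → Spec_count_palindromes_behind s (count_palindromes_behind s)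

-- ===== LEMMAS AND PROOFS =====

-- clean model of A's digit extraction: LSB-first base-4 digits as letters
def cpbDigN : Nat → Nat → List Char
  | 0, _ => []
  | k+1, m => cpbALPHA.getD (m % 4) 'a' :: cpbDigN k (m / 4)

-- first half of the num-th palindrome (MSB first)
def cpbFh (h m : Nat) : List Char := (cpbDigN h m).reverse

-- the palindrome built from a first half
def cpbPalOf (evenLen : Bool) (t : List Char) : List Char :=
  t ++ (if evenLen then t.reverse else t.dropLast.reverse)

theorem cpb_rev_take (s : List Char) (n : Nat) (h : n + 1 ≤ s.length) :
    List.filterMap (fun x => s[((n:Int) + -(x:Nat)).toNat]?) (List.range (n+1))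
      = (s.take (n+1)).reverse := by
  have hmap : List.filterMap (fun x => s[((n:Int) + -(x:Nat)).toNat]?) (List.range (n+1))
      = (List.range (n+1)).map (fun x => s.getD (n - x) 'a') := by
    rw [List.filterMap_eq_map_iff_forall_eq_some.mpr]
    intro x hx
    have hx' : x < n + 1 := List.mem_range.mp hx
    have ht : ((n:Int) + -(x:Nat)).toNat = n - x := by omega
    have hlt : n - x < s.length := by omega
    rw [ht, List.getElem?_eq_getElem hlt, List.getD_eq_getElem s 'a' hlt]
  rw [hmap]
  apply List.ext_getElem
  · simp; omega
  · intro i h1 h2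
    have hi : i < n + 1 := by simpa using h1
    have hlt : n - i < s.length := by omega
    simp only [List.getElem_map, List.getElem_range, List.getElem_reverse]
    rw [List.getD_eq_getElem s 'a' hlt, List.getElem_take]
    congr 1
    simp
    omega

theorem cpb_slice_neg2 (t : List Char) :
    PySem.List.slice? t (some (-2)) none (-1) = some t.dropLast.reverse := by
  match t with
  | [] => rfl
  | [a] => simp [PySem.List.slice?, PySem.List.sliceIndices]
  | a :: b :: t'' =>
    simp only [PySem.List.slice?, PySem.List.sliceIndices, List.length_cons]
    norm_num
    have hmax : max (-2 + ((t''.length : Int) + 1 + 1)) (-1) = (t''.length : Int) := by omega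
    rw [hmax]
    have hr : ((t''.length : Int) + 1).toNat = t''.length + 1 := by omega
    rw [hr]
    rw [cpb_rev_take (a :: b :: t'') t''.length (by simp)]
    have : (a :: b :: t'').take (t''.length + 1) = (a :: b :: t'').dropLast := by
      rw [List.dropLast_eq_take]
      simp
    rw [this]
    simp

theorem cpbDigitsLoop_natCast : ∀ (k : Nat) (ds : List Char) (m : Nat),
    cpbDigitsLoop k (ds, (m:Int)) = (ds ++ cpbDigN k m, ((m / 4^k : Nat) : Int)) := by
  intro k
  induction k with
  | zero => intro ds m; simp [cpbDigitsLoop, cpbDigN]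
  | succ k ih =>
    intro ds m
    have h4 : ((4:Nat):Int) = (4:Int) := by norm_num
    show cpbDigitsLoop k (ds ++ [PySem.List.pyGetD cpbALPHA (PySem.Int.mod (m:Int) 4) 'a'],
          PySem.Int.floordiv (m:Int) 4) = _
    rw [← h4, PySem.Int.mod_natCast, PySem.Int.floordiv_natCast, PySem.List.pyGetD_natCast, ih]
    have hd : m / 4 / 4 ^ k = m / 4 ^ (k+1) := by
      rw [Nat.div_div_eq_div_mul, pow_succ, mul_comm]
    rw [hd]
    show (ds ++ [cpbALPHA.getD (m % 4) 'a'] ++ cpbDigN k (m / 4), _) = _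
    rw [List.append_assoc]
    rfl

theorem cpbDigN_length (h : Nat) : ∀ m, (cpbDigN h m).length = h := by
  induction h with
  | zero => intro m; rfl
  | succ h ih => intro m; simp [cpbDigN, ih]

theorem cpbDigN_mod : ∀ (h m : Nat), cpbDigN h (m % 4^h) = cpbDigN h m := by
  intro h
  induction h with
  | zero => intro m; rfl
  | succ h ih =>
    intro m
    have h1 : m % 4^(h+1) % 4 = m % 4 := Nat.mod_mod_of_dvd m (dvd_pow_self 4 (Nat.succ_ne_zero h))
    have h2 : m % 4^(h+1) / 4 = m / 4 % 4^h := by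
      rw [pow_succ, mul_comm, Nat.mod_mul_right_div_self]
    show cpbALPHA.getD (m % 4^(h+1) % 4) 'a' :: cpbDigN h (m % 4^(h+1) / 4) = _
    rw [h1, h2, ih]
    rfl

theorem cpbDigN_succ : ∀ (h m : Nat),
    cpbDigN (h+1) m = cpbDigN h m ++ [cpbALPHA.getD (m / 4^h % 4) 'a'] := by
  intro h
  induction h with
  | zero => intro m; simp [cpbDigN]
  | succ h ih =>
    intro m
    show cpbALPHA.getD (m % 4) 'a' :: cpbDigN (h+1) (m / 4) = _
    rw [ih]
    have : m / 4 / 4^h = m / 4^(h+1) := by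
      rw [Nat.div_div_eq_div_mul, pow_succ, mul_comm]
    rw [this]
    rfl

theorem cpbFh_length (h m : Nat) : (cpbFh h m).length = h := by
  simp [cpbFh, cpbDigN_length]

theorem cpbFh_succ (h m : Nat) :
    cpbFh (h+1) m = cpbALPHA.getD (m / 4^h % 4) 'a' :: cpbFh h (m % 4^h) := by
  unfold cpbFh
  rw [cpbDigN_succ, List.reverse_append, cpbDigN_mod]
  rfl

theorem cpbALPHA_getD_lt : ∀ q2 < 4, ∀ q1 < q2, cpbALPHA.getD q1 'a' < cpbALPHA.getD q2 'a' := by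
  decide

theorem cpbFh_lt : ∀ (h : Nat) (m1 m2 : Nat), m1 < m2 → m2 < 4^h → cpbFh h m1 < cpbFh h m2 := by
  intro h
  induction h with
  | zero => intro m1 m2 h12 h2; omega
  | succ h ih =>
    intro m1 m2 h12 h2
    rw [cpbFh_succ, cpbFh_succ]
    have hT : 0 < 4^h := Nat.pow_pos (by norm_num)
    have hq2 : m2 / 4^h < 4 := by
      rw [Nat.div_lt_iff_lt_mul hT]
      calc m2 < 4^(h+1) := h2
        _ = 4 * 4^h := by ring
    have hq : m1 / 4^h ≤ m2 / 4^h := Nat.div_le_div_right (le_of_lt h12)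
    rcases lt_or_eq_of_le hq with hlt | heq
    · have hq1 : m1 / 4^h < 4 := lt_trans hlt hq2
      rw [Nat.mod_eq_of_lt hq1, Nat.mod_eq_of_lt hq2]
      exact List.cons_lt_cons_iff.mpr (Or.inl (cpbALPHA_getD_lt (m2 / 4^h) hq2 (m1 / 4^h) hlt))
    · have d1 := Nat.div_add_mod m1 (4^h)
      have d2 := Nat.div_add_mod m2 (4^h)
      have hm2 : m2 % 4^h < 4^h := Nat.mod_lt _ hT
      have hm : m1 % 4^h < m2 % 4^h := by rw [heq] at d1; omega
      exact List.cons_lt_cons_iff.mpr (Or.inr ⟨by rw [heq], ih _ _ hm hm2⟩)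

theorem cpbPal_natCast (h : Nat) (ev : Bool) (m : Nat) :
    cpbPal h ev (m:Int) = cpbPalOf ev (cpbFh h m) := by
  unfold cpbPal cpbPalOf
  rw [cpbDigitsLoop_natCast]
  simp only [List.nil_append]
  rw [PySem.List.slice?_none_none_neg_one, cpb_slice_neg2]
  cases ev <;> simp [cpbFh]

theorem cpb_append_lt {t1 t2 : List Char} : ∀ {u1 u2 : List Char}, t1.length = t2.length →
    t1 < t2 → t1 ++ u1 < t2 ++ u2 := by
  induction t1 generalizing t2 with
  | nil =>
    intro u1 u2 hl h
    cases t2 with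
    | nil => exact absurd h (lt_irrefl _)
    | cons b l2 => simp at hl
  | cons a l1 ih =>
    intro u1 u2 hl h
    cases t2 with
    | nil => simp at hl
    | cons b l2 =>
      rcases List.cons_lt_cons_iff.mp h with hr | ⟨he, ht⟩
      · exact List.cons_lt_cons_iff.mpr (Or.inl hr)
      · exact List.cons_lt_cons_iff.mpr (Or.inr ⟨he, ih (by simpa using hl) ht⟩)

theorem cpb_append_lt_iff : ∀ (t p u v : List Char), t.length = p.length →
    (t ++ u < p ++ v ↔ t < p ∨ (t = p ∧ u < v)) := by
  intro t
  induction t with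
  | nil =>
    intro p u v hl
    cases p with
    | nil => simp
    | cons b l2 => simp at hl
  | cons a l1 ih =>
    intro p u v hl
    cases p with
    | nil => simp at hl
    | cons b l2 =>
      simp only [List.cons_append]
      rw [List.cons_lt_cons_iff, List.cons_lt_cons_iff, ih l2 u v (by simpa using hl)]
      constructor
      · rintro (hr | ⟨he, hor | ⟨he2, huv⟩⟩)
        · exact Or.inl (Or.inl hr)
        · exact Or.inl (Or.inr ⟨he, hor⟩)
        · exact Or.inr ⟨by rw [he, he2], huv⟩
      · rintro ((hr | ⟨he, hor⟩) | ⟨he, huv⟩)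
        · exact Or.inl hr
        · exact Or.inr ⟨he, Or.inl hor⟩
        · injection he with h1 h2
          exact Or.inr ⟨h1, Or.inr ⟨h2, huv⟩⟩

theorem cpbLoop_count (l : List Char) (h : Nat) (ev : Bool) :
    ∀ (ms : List Nat) (count : Int), ms.Pairwise (· < ·) → (∀ m ∈ ms, m < 4^h) →
    cpbLoop l h ev (ms.map Int.ofNat) count
      = count + ((ms.countP (fun m => decide (cpbPalOf ev (cpbFh h m) < l)) : Nat) : Int) := by
  intro ms
  induction ms with
  | nil => intro count _ _; simp [cpbLoop]
  | cons m ms ih =>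
    intro count hpw hbd
    rw [List.map_cons]
    show cpbLoop l h ev (Int.ofNat m :: ms.map Int.ofNat) count = _
    show (if cpbPal h ev (Int.ofNat m) < l then cpbLoop l h ev (ms.map Int.ofNat) (count+1)
          else if l ≤ cpbPal h ev (Int.ofNat m) then count else cpbLoop l h ev (ms.map Int.ofNat) count) = _
    have hc : (Int.ofNat m) = ((m : Nat) : Int) := rfl
    rw [hc]
    rw [cpbPal_natCast]
    rcases List.pairwise_cons.mp hpw with ⟨hm, hpw'⟩
    by_cases hp : cpbPalOf ev (cpbFh h m) < l
    · rw [if_pos hp, ih (count+1) hpw' (fun b hb => hbd b (List.mem_cons_of_mem m hb))]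
      rw [List.countP_cons]
      simp [hp]
      ring
    · rw [if_neg hp, if_pos (not_lt.mp hp)]
      have hz : ms.countP (fun m => decide (cpbPalOf ev (cpbFh h m) < l)) = 0 := by
        rw [List.countP_eq_zero]
        intro b hb
        simp only [decide_eq_true_eq]
        intro hbl
        exact hp (lt_trans (cpb_append_lt (by simp [cpbFh, cpbDigN_length]) (cpbFh_lt h m b (hm b hb) (hbd b (List.mem_cons_of_mem m hb)))) hbl)
      rw [List.countP_cons]
      simp [hp, hz]

def cpbCntLt (h : Nat) (p : List Char) : Nat :=
  (List.range (4^h)).countP (fun m => decide (cpbFh h m < p))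
def cpbCntEq (h : Nat) (p : List Char) : Nat :=
  (List.range (4^h)).countP (fun m => decide (cpbFh h m = p))

theorem cpb_range_mul (T : Nat) : ∀ (k : Nat),
    List.range (k*T) = (List.range k).flatMap (fun q => (List.range T).map (fun r => q*T + r)) := by
  intro k
  induction k with
  | zero => simp
  | succ k ih =>
    rw [Nat.succ_mul, List.range_add, ih, List.range_succ, List.flatMap_append]
    congr 1
    simp

theorem cpb_countP_flatMap {α β : Type} (l : List α) (f : α → List β) (p : β → Bool) :
    (l.flatMap f).countP p = (l.map (fun x => (f x).countP p)).sum := by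
  induction l with
  | nil => simp
  | cons a l ih => simp [List.flatMap_cons, List.countP_append, ih]

-- the inner count for a fixed leading letter

theorem cpb_inner_lt (h : Nat) (a c : Char) (p' : List Char) :
    (List.range (4^h)).countP (fun r => decide (a :: cpbFh h r < c :: p'))
      = if a < c then 4^h else if a = c then cpbCntLt h p' else 0 := by
  by_cases h1 : a < c
  · rw [if_pos h1]
    have : ∀ r ∈ List.range (4^h), (decide (a :: cpbFh h r < c :: p')) = true := by
      intro r _
      simp only [decide_eq_true_eq]
      exact List.cons_lt_cons_iff.mpr (Or.inl h1)
    calc (List.range (4^h)).countP (fun r => decide (a :: cpbFh h r < c :: p'))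
        = (List.range (4^h)).countP (fun _ => true) := List.countP_congr (by intro r hr; simp [this r hr])
      _ = 4^h := by simp
  · by_cases h2 : a = c
    · rw [if_neg h1, if_pos h2]
      subst h2
      unfold cpbCntLt
      apply List.countP_congr
      intro r _
      simp only [decide_eq_true_eq, List.cons_lt_cons_iff]
      constructor
      · rintro (hab | ⟨_, ht⟩); exact absurd hab h1; exact ht
      · intro ht; exact Or.inr ⟨by trivial, ht⟩
    · rw [if_neg h1, if_neg h2]
      rw [List.countP_eq_zero]
      intro r _
      simp only [decide_eq_true_eq, List.cons_lt_cons_iff]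
      rintro (hab | ⟨he, _⟩); exact h1 hab; exact h2 he

theorem cpb_inner_eq (h : Nat) (a c : Char) (p' : List Char) :
    (List.range (4^h)).countP (fun r => decide (a :: cpbFh h r = c :: p'))
      = if a = c then cpbCntEq h p' else 0 := by
  by_cases h2 : a = c
  · rw [if_pos h2]; subst h2
    apply List.countP_congr
    intro r _
    simp
  · rw [if_neg h2, List.countP_eq_zero]
    intro r _
    simp [h2]

-- decompose the range 4^(h+1) count by the leading digit

theorem cpb_count_split (h : Nat) (p : Nat → List Char → Bool) :
    (List.range (4^(h+1))).countP (fun m => p (m / 4^h % 4) (cpbFh h (m % 4^h)))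
      = ((List.range 4).map (fun q => (List.range (4^h)).countP (fun r => p q (cpbFh h r)))).sum := by
  have h4 : (4:Nat)^(h+1) = 4 * 4^h := by ring
  have hT : 0 < 4^h := Nat.pow_pos (by norm_num)
  rw [h4, cpb_range_mul (4^h) 4, cpb_countP_flatMap]
  congr 1
  apply List.map_congr_left
  intro q hq
  have hq4 : q < 4 := List.mem_range.mp hq
  rw [List.countP_map]
  apply List.countP_congr
  intro r hr
  have hrT : r < 4^h := List.mem_range.mp hr
  have e1 : (q * 4^h + r) / 4^h % 4 = q := by
    rw [mul_comm, Nat.mul_add_div hT, Nat.div_eq_of_lt hrT, Nat.add_zero, Nat.mod_eq_of_lt hq4]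
  have e2 : (q * 4^h + r) % 4^h = r := by
    rw [mul_comm, Nat.mul_add_mod, Nat.mod_eq_of_lt hrT]
  simp [Function.comp, e1, e2]

theorem cpbCntLt_eq_rank : ∀ (h : Nat) (p : List Char), p.length = h →
    ((cpbCntLt h p : Nat) : Int) = cpbRank p := by
  intro h
  induction h with
  | zero =>
    intro p hp
    rw [List.length_eq_zero_iff.mp hp]
    decide
  | succ h ih =>
    intro p hp
    cases p with
    | nil => simp at hp
    | cons c p' =>
      have hp' : p'.length = h := by simpa using hp
      have e0 : cpbCntLt (h+1) (c :: p')
          = (List.range (4^(h+1))).countP (fun m =>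
              (fun q t => decide ((cpbALPHA.getD q 'a') :: t < c :: p')) (m / 4^h % 4) (cpbFh h (m % 4^h))) := by
        unfold cpbCntLt
        exact List.countP_congr (fun m _ => by rw [cpbFh_succ])
      have e1 : cpbCntLt (h+1) (c :: p')
          = ((List.range 4).map (fun q => (List.range (4^h)).countP
              (fun r => decide ((cpbALPHA.getD q 'a') :: cpbFh h r < c :: p')))).sum := by
        rw [e0, cpb_count_split h (fun q t => decide ((cpbALPHA.getD q 'a') :: t < c :: p'))]
      have hr4 : List.range 4 = [0,1,2,3] := by decide
      rw [e1, hr4]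
      simp only [List.map_cons, List.map_nil, List.sum_cons, List.sum_nil]
      rw [cpb_inner_lt, cpb_inner_lt, cpb_inner_lt, cpb_inner_lt]
      have g0 : cpbALPHA.getD 0 'a' = 'a' := rfl
      have g1 : cpbALPHA.getD 1 'a' = 'b' := rfl
      have g2 : cpbALPHA.getD 2 'a' = 'c' := rfl
      have g3 : cpbALPHA.getD 3 'a' = 'd' := rfl
      rw [g0, g1, g2, g3]
      have hL := ih p' hp'
      rcases lt_trichotomy c 'a' with ha | ha | ha
      · have f1 : ¬ ('a' < c) := fun hx => lt_irrefl _ (lt_trans hx ha)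
        have f2 : 'a' ≠ c := fun hx => lt_irrefl _ (hx ▸ ha)
        have hb : c < 'b' := lt_trans ha (by decide)
        have hc : c < 'c' := lt_trans ha (by decide)
        have hd : c < 'd' := lt_trans ha (by decide)
        have f3 : ¬ ('b' < c) := fun hx => lt_irrefl _ (lt_trans hx hb)
        have f4 : 'b' ≠ c := fun hx => lt_irrefl _ (hx ▸ hb)
        have f5 : ¬ ('c' < c) := fun hx => lt_irrefl _ (lt_trans hx hc)
        have f6 : 'c' ≠ c := fun hx => lt_irrefl _ (hx ▸ hc)
        have f7 : ¬ ('d' < c) := fun hx => lt_irrefl _ (lt_trans hx hd)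
        have f8 : 'd' ≠ c := fun hx => lt_irrefl _ (hx ▸ hd)
        simp [cpbRank, cpbBelow, cpbALPHA, f1, f2, f3, f4, f5, f6, f7, f8]
        exact fun hx => absurd hx (by simp [Ne.symm f2, Ne.symm f4, Ne.symm f6, Ne.symm f8])
      · subst ha
        simp [cpbRank, cpbBelow, cpbALPHA, hp']
        try push_cast
        rw [← hL]
        try push_cast
        try ring
      · rcases lt_trichotomy c 'b' with hb | hb | hb
        · have t0 : 'a' < c := ha
          have n0 : 'a' ≠ c := ne_of_lt t0
          have u1 : c < 'b' := hb
          have t1 : ¬ ('b' < c) := fun hx => lt_irrefl _ (lt_trans hx u1)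
          have n1 : 'b' ≠ c := fun hx => lt_irrefl _ (hx ▸ u1)
          have u2 : c < 'c' := lt_trans hb (by decide)
          have t2 : ¬ ('c' < c) := fun hx => lt_irrefl _ (lt_trans hx u2)
          have n2 : 'c' ≠ c := fun hx => lt_irrefl _ (hx ▸ u2)
          have u3 : c < 'd' := lt_trans hb (by decide)
          have t3 : ¬ ('d' < c) := fun hx => lt_irrefl _ (lt_trans hx u3)
          have n3 : 'd' ≠ c := fun hx => lt_irrefl _ (hx ▸ u3)
          simp [cpbRank, cpbBelow, cpbALPHA, t0, t1, t2, t3, n1, n2, n3]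
          rw [if_neg (by push Not; exact ⟨Ne.symm n0, Ne.symm n1, Ne.symm n2, Ne.symm n3⟩), hp']
          try ring
        · subst hb
          simp [cpbRank, cpbBelow, cpbALPHA, hp']
          try push_cast
          rw [← hL]
          try push_cast
          try ring
        · rcases lt_trichotomy c 'c' with hc | hc | hc
          · have t0 : 'a' < c := lt_trans (by decide) hb
            have n0 : 'a' ≠ c := ne_of_lt t0
            have t1 : 'b' < c := hb
            have n1 : 'b' ≠ c := ne_of_lt t1
            have u2 : c < 'c' := hc
            have t2 : ¬ ('c' < c) := fun hx => lt_irrefl _ (lt_trans hx u2)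
            have n2 : 'c' ≠ c := fun hx => lt_irrefl _ (hx ▸ u2)
            have u3 : c < 'd' := lt_trans hc (by decide)
            have t3 : ¬ ('d' < c) := fun hx => lt_irrefl _ (lt_trans hx u3)
            have n3 : 'd' ≠ c := fun hx => lt_irrefl _ (hx ▸ u3)
            simp [cpbRank, cpbBelow, cpbALPHA, t0, t1, t2, t3, n2, n3]
            rw [if_neg (by push Not; exact ⟨Ne.symm n0, Ne.symm n1, Ne.symm n2, Ne.symm n3⟩), hp']
            try ring
          · subst hc
            simp [cpbRank, cpbBelow, cpbALPHA, hp']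
            try push_cast
            rw [← hL]
            ring
          · rcases lt_trichotomy c 'd' with hd | hd | hd
            · have t0 : 'a' < c := lt_trans (by decide) hc
              have n0 : 'a' ≠ c := ne_of_lt t0
              have t1 : 'b' < c := lt_trans (by decide) hc
              have n1 : 'b' ≠ c := ne_of_lt t1
              have t2 : 'c' < c := hc
              have n2 : 'c' ≠ c := ne_of_lt t2
              have u3 : c < 'd' := hd
              have t3 : ¬ ('d' < c) := fun hx => lt_irrefl _ (lt_trans hx u3)
              have n3 : 'd' ≠ c := fun hx => lt_irrefl _ (hx ▸ u3)
              simp [cpbRank, cpbBelow, cpbALPHA, t0, t1, t2, t3, n3]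
              rw [if_neg (by push Not; exact ⟨Ne.symm n0, Ne.symm n1, Ne.symm n2, Ne.symm n3⟩), hp']
              try ring
            · subst hd
              simp [cpbRank, cpbBelow, cpbALPHA, hp']
              try push_cast
              rw [← hL]
              try push_cast
              try ring
            · have t0 : 'a' < c := lt_trans (by decide) hd
              have n0 : 'a' ≠ c := ne_of_lt t0
              have t1 : 'b' < c := lt_trans (by decide) hd
              have n1 : 'b' ≠ c := ne_of_lt t1
              have t2 : 'c' < c := lt_trans (by decide) hd
              have n2 : 'c' ≠ c := ne_of_lt t2
              have t3 : 'd' < c := hd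
              have n3 : 'd' ≠ c := ne_of_lt t3
              simp [cpbRank, cpbBelow, cpbALPHA, t0, t1, t2, t3]
              rw [if_neg (by push Not; exact ⟨Ne.symm n0, Ne.symm n1, Ne.symm n2, Ne.symm n3⟩), hp']
              try ring

theorem cpbCntEq_eq : ∀ (h : Nat) (p : List Char), p.length = h →
    cpbCntEq h p = if p.all (fun c => c ∈ cpbALPHA) then 1 else 0 := by
  intro h
  induction h with
  | zero =>
    intro p hp
    rw [List.length_eq_zero_iff.mp hp]
    decide
  | succ h ih =>
    intro p hp
    cases p with
    | nil => simp at hp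
    | cons c p' =>
      have hp' : p'.length = h := by simpa using hp
      have e0 : cpbCntEq (h+1) (c :: p')
          = (List.range (4^(h+1))).countP (fun m =>
              (fun q t => decide ((cpbALPHA.getD q 'a') :: t = c :: p')) (m / 4^h % 4) (cpbFh h (m % 4^h))) := by
        unfold cpbCntEq
        exact List.countP_congr (fun m _ => by rw [cpbFh_succ])
      have e1 : cpbCntEq (h+1) (c :: p')
          = ((List.range 4).map (fun q => (List.range (4^h)).countP
              (fun r => decide ((cpbALPHA.getD q 'a') :: cpbFh h r = c :: p')))).sum := by
        rw [e0, cpb_count_split h (fun q t => decide ((cpbALPHA.getD q 'a') :: t = c :: p'))]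
      have hr4 : List.range 4 = [0,1,2,3] := by decide
      rw [e1, hr4]
      simp only [List.map_cons, List.map_nil, List.sum_cons, List.sum_nil]
      rw [cpb_inner_eq, cpb_inner_eq, cpb_inner_eq, cpb_inner_eq]
      have g0 : cpbALPHA.getD 0 'a' = 'a' := rfl
      have g1 : cpbALPHA.getD 1 'a' = 'b' := rfl
      have g2 : cpbALPHA.getD 2 'a' = 'c' := rfl
      have g3 : cpbALPHA.getD 3 'a' = 'd' := rfl
      rw [g0, g1, g2, g3, ih p' hp']
      by_cases h0 : c = 'a'
      · subst h0; simp [cpbALPHA]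
      by_cases h1 : c = 'b'
      · subst h1; simp [cpbALPHA]
      by_cases h2 : c = 'c'
      · subst h2; simp [cpbALPHA]
      by_cases h3 : c = 'd'
      · subst h3; simp [cpbALPHA]
      have n0 : ('a' = c) = False := by simp; exact fun hx => h0 hx.symm
      have n1 : ('b' = c) = False := by simp; exact fun hx => h1 hx.symm
      have n2 : ('c' = c) = False := by simp; exact fun hx => h2 hx.symm
      have n3 : ('d' = c) = False := by simp; exact fun hx => h3 hx.symm
      have nm : (c ∈ cpbALPHA) = False := by simp [cpbALPHA, h0, h1, h2, h3]
      simp only [n0, n1, n2, n3, if_false]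
      simp [nm]

theorem cpb_countP_or (xs : List Nat) (f g : Nat → Bool)
    (hdis : ∀ m, f m = true → g m = false) :
    xs.countP (fun m => f m || g m) = xs.countP f + xs.countP g := by
  induction xs with
  | nil => simp
  | cons a xs ih =>
    rw [List.countP_cons, List.countP_cons, List.countP_cons, ih]
    by_cases hf : f a = true
    · simp [hf, hdis a hf]; omega
    · simp at hf
      simp [hf]
      omega

-- the characterisation of "A's palindrome for m is < s"

theorem cpb_pal_lt_iff (l : List Char) (ev : Bool) (h : Nat) (hh : h ≤ l.length) (m : Nat) :
    (cpbPalOf ev (cpbFh h m) < l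
      ↔ cpbFh h m < l.take h ∨ (cpbFh h m = l.take h ∧ cpbPalOf ev (l.take h) < l)) := by
  have hp_len : (l.take h).length = h := by simp; omega
  obtain ⟨u, v, hu, hlv⟩ : ∃ u v, u = l.take h ∧ l = u ++ v :=
    ⟨l.take h, l.drop h, rfl, (List.take_append_drop h l).symm⟩
  have hul : u.length = h := by rw [hu, hp_len]
  rw [← hu, hlv]
  have hfh : (cpbFh h m).length = u.length := by rw [cpbFh_length, hul]
  unfold cpbPalOf
  rw [cpb_append_lt_iff _ _ _ _ hfh, cpb_append_lt_iff _ _ _ _ (rfl : u.length = u.length)]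
  constructor
  · rintro (hc | ⟨he, ht⟩)
    · exact Or.inl hc
    · exact Or.inr ⟨he, Or.inr ⟨rfl, by rw [← he]; exact ht⟩⟩
  · rintro (hc | ⟨he, (hc2 | ⟨_, ht2⟩)⟩)
    · exact Or.inl hc
    · exact absurd hc2 (lt_irrefl _)
    · exact Or.inr ⟨he, by rw [he]; exact ht2⟩

theorem cpb_main (s : String) : count_palindromes_behind s = count_palindromes_behind_alt s := by
  have hA : count_palindromes_behind s
      = cpbLoop s.toList ((PySem.Int.floordiv (PySem.Str.len s + 1) 2).toNat)
          (PySem.Int.mod (PySem.Str.len s) 2 == 0)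
          (PySem.List.pyRange 0 ((4:Int) ^ ((PySem.Int.floordiv (PySem.Str.len s + 1) 2).toNat)) 1) 0 := rfl
  have hB : count_palindromes_behind_alt s
      = (if ((s.toList.take ((s.toList.length + 1)/2)).all (fun c => c ∈ cpbALPHA)) then
           (if (s.toList.take ((s.toList.length + 1)/2)
                 ++ (if s.toList.length % 2 = 0 then (s.toList.take ((s.toList.length + 1)/2)).reverse
                     else (s.toList.take ((s.toList.length + 1)/2)).dropLast.reverse)) < s.toList
            then cpbRank (s.toList.take ((s.toList.length + 1)/2)) + 1
            else cpbRank (s.toList.take ((s.toList.length + 1)/2)))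
         else cpbRank (s.toList.take ((s.toList.length + 1)/2))) := rfl
  rw [hA, hB]
  set l := s.toList with hl
  set n := l.length with hn
  set h := (n + 1) / 2 with hh
  set p := l.take h with hp
  have hhn : h ≤ n := by omega
  have hp_len : p.length = h := by rw [hp]; simp; omega
  have hlen : PySem.Str.len s = (n : Int) := by rw [PySem.Str.len_eq]
  have hfd : PySem.Int.floordiv ((n:Int) + 1) 2 = ((h : Nat) : Int) := by
    have e1 : ((n:Int) + 1) = (((n+1 : Nat)) : Int) := by push_cast; ring
    have e2 : ((2:Nat):Int) = (2:Int) := by norm_num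
    rw [e1, ← e2, PySem.Int.floordiv_natCast]
  have hev : (PySem.Int.mod (n:Int) 2 == 0) = decide (n % 2 = 0) := by
    have e2 : ((2:Nat):Int) = (2:Int) := by norm_num
    rw [← e2, PySem.Int.mod_natCast]
    rcases Nat.mod_two_eq_zero_or_one n with he | he <;> simp [he]
  have hrange : PySem.List.pyRange 0 ((4:Int) ^ h) 1 = (List.range (4^h)).map Int.ofNat := by
    rw [PySem.List.pyRange_one]
    have e3 : ((4:Int)^h - 0) = ((4^h : Nat) : Int) := by push_cast; ring
    rw [e3, Int.toNat_natCast]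
    apply List.map_congr_left
    intro k _
    simp
  rw [hlen, hfd, Int.toNat_natCast, hev, hrange]
  rw [cpbLoop_count l h (decide (n % 2 = 0)) (List.range (4^h)) 0
        (List.pairwise_lt_range) (fun m hm => List.mem_range.mp hm)]
  set ev := decide (n % 2 = 0) with hev2
  have hcong : (List.range (4^h)).countP (fun m => decide (cpbPalOf ev (cpbFh h m) < l))
      = (List.range (4^h)).countP (fun m => decide (cpbFh h m < p)
          || (decide (cpbFh h m = p) && decide (cpbPalOf ev p < l))) := by
    apply List.countP_congr
    intro m _
    rw [decide_eq_decide.mpr (cpb_pal_lt_iff l ev h hhn m), Bool.decide_or, Bool.decide_and]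
  rw [hcong, cpb_countP_or _ _ _ (by
      intro m hf
      simp only [decide_eq_true_eq] at hf
      simp [ne_of_lt hf])]
  have hsec : (List.range (4^h)).countP (fun m => decide (cpbFh h m = p) && decide (cpbPalOf ev p < l))
      = if cpbPalOf ev p < l then cpbCntEq h p else 0 := by
    by_cases hC : cpbPalOf ev p < l
    · rw [if_pos hC]
      unfold cpbCntEq
      apply List.countP_congr
      intro m _
      simp [hC]
    · rw [if_neg hC, List.countP_eq_zero]
      intro m _
      simp [hC]
  rw [hsec]
  have hbpal : (p ++ (if n % 2 = 0 then p.reverse else p.dropLast.reverse)) = cpbPalOf ev p := by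
    unfold cpbPalOf
    rcases Nat.mod_two_eq_zero_or_one n with he | he <;> simp [hev2, he]
  rw [hbpal]
  have hlt := cpbCntLt_eq_rank h p hp_len
  have heq := cpbCntEq_eq h p hp_len
  rw [show (List.range (4^h)).countP (fun m => decide (cpbFh h m < p)) = cpbCntLt h p from rfl]
  by_cases hall : p.all (fun c => c ∈ cpbALPHA)
  · rw [if_pos hall]
    by_cases hC : cpbPalOf ev p < l
    · rw [if_pos hC, if_pos hC, heq, if_pos hall]
      push_cast
      rw [hlt]
      ring
    · rw [if_neg hC, if_neg hC]
      push_cast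
      rw [hlt]
      ring
  · rw [if_neg hall, heq, if_neg hall]
    by_cases hC : cpbPalOf ev p < l
    · rw [if_pos hC]
      push_cast
      rw [hlt]
      ring
    · rw [if_neg hC]
      push_cast
      rw [hlt]
      ring

-- ===== VERDICT (by name: the statement is the Claim_ definition above) =====
theorem count_palindromes_behind_spec : Claim_equal_count_palindromes_behind := by
  intro s _
  unfold Spec_count_palindromes_behind
  exact cpb_main s
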